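-- pv_equiv track=rewrite | github.com/EmmaDeste/Harmon_is_digital | util_notes.py | partition_to_noteduree
-- ===== SOURCE A (Python) =====
-- def partition_to_noteduree(partition):  #Emma : Une fonction read_sheet qui à partir d’une ligne du fichier extrait les notes, les figures, les silences et les points de prolongation et construit une séquence de fréquences et de durée qu’elle retourne en sortie.??
--     """
--     Encode a partition to notes numbers and duration numbers
--     :param str partition: partition en toutes lettres à transformer
--     :return: les notes et les durées sous forme de chiffres et séparées
--     :rtype: tuple (notes numbers, duration numbers)
--     """
--     l = partition.split(' ')
--     n = []
--     d = []
--     dico_n = {"DO": 0, "DOD":1, "RE": 2, "RED":3, "MI": 4,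
--               "FA": 5, "FAD": 6, "SOL": 7, "SOLD": 8, "LA": 9, "LAD": 10, "SI": 11, "Z": -1, "": -2}
--     dico_d = {"c": 2, "n": 4, "b": 8, "r": 16}
--     for x in l:
--         note = ""
--         duree = ""
--         for y in x:
--             if 'A' <= y <= 'Z':
--                 note = note + y
--             else:
--                 duree = duree + y
--         n.append(note)
--         d.append(duree)
--     nc = []
--     dc = []
--     for i in range(len(n)):
--         sn = n[i]
--         sd = d[i]
--         if sd == 'p' and dc!=[]:
--             dc[-1] += dc[-1] // 2
--         else:
--             if sn in dico_n and sd in dico_d: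
--                 nc.append(dico_n[sn])
--                 dc.append(dico_d[sd])
--     return (nc, dc)
--
-- l = [0, 9, 2, 11, 7, 9, 5, 4]
-- ===== SOURCE B (Python) =====
-- def partition_to_noteduree(partition):
--     """Streaming parser: one pass over the characters, emitting on each space."""
--     dico_n = {"DO": 0, "DOD": 1, "RE": 2, "RED": 3, "MI": 4,
--               "FA": 5, "FAD": 6, "SOL": 7, "SOLD": 8, "LA": 9,
--               "LAD": 10, "SI": 11, "Z": -1, "": -2}
--     dico_d = {"c": 2, "n": 4, "b": 8, "r": 16}
--     nc = []
--     dc = []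
--     note = ""
--     duree = ""
--
--     def emit():
--         nonlocal note, duree
--         if duree == 'p' and dc:
--             dc[-1] += dc[-1] // 2
--         elif note in dico_n and duree in dico_d:
--             nc.append(dico_n[note])
--             dc.append(dico_d[duree])
--         note = ""
--         duree = ""
--
--     for ch in partition:
--         if ch == ' ':
--             emit()
--         elif 'A' <= ch <= 'Z':
--             note += ch
--         else:
--             duree += ch
--     emit()
--     return (nc, dc)
-- ===== Notes on version B (the rewrite author's own statement) =====
-- stated objective: alternative
-- what changed: B replaces A's split-then-classify-then-index pipeline (three passes, two intermediate parallel string lists) with a single streaming character-level parser: one scan over the string that accumulates the current token's note/duree and emits directly into the output lists at each space and once at the end.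
import Mathlib
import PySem

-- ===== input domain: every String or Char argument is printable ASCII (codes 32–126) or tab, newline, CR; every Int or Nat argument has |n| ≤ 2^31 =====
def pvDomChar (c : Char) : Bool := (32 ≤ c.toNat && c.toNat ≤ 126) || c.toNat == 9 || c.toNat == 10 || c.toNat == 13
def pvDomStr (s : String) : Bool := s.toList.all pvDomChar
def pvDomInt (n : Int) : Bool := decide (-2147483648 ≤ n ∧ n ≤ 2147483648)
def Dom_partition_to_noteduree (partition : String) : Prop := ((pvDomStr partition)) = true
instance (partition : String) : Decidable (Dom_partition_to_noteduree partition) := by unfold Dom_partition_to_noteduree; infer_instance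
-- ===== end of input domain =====

-- B replaces A's split / classify / index pipeline with a single streaming
-- character-level parser that emits into the output lists at each space; same values.

-- shared constants (both Pythons define the same literal dictionaries / character test)
def pvIsUp (c : Char) : Bool := decide ('A' ≤ c) && decide (c ≤ 'Z')

def pvDicoN : PySem.Dict (List Char) Int :=
  PySem.Dict.ofList [("DO".toList, 0), ("DOD".toList, 1), ("RE".toList, 2), ("RED".toList, 3),
    ("MI".toList, 4), ("FA".toList, 5), ("FAD".toList, 6), ("SOL".toList, 7), ("SOLD".toList, 8),
    ("LA".toList, 9), ("LAD".toList, 10), ("SI".toList, 11), ("Z".toList, -1), ("".toList, -2)]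

def pvDicoD : PySem.Dict (List Char) Int :=
  PySem.Dict.ofList [("c".toList, 2), ("n".toList, 4), ("b".toList, 8), ("r".toList, 16)]

-- ===== PORT A =====
-- the body of A's second (index) loop, on the i-th note/duree strings
def pvStepA (acc : List Int × List Int) (sn sd : List Char) : List Int × List Int :=
  if sd = ['p'] ∧ acc.2 ≠ [] then
    (acc.1, acc.2.dropLast ++ [acc.2.getLast! + PySem.Int.floordiv acc.2.getLast! 2])
  else if pvDicoN.contains sn ∧ pvDicoD.contains sd then
    (acc.1 ++ [pvDicoN.getD sn 0], acc.2 ++ [pvDicoD.getD sd 0])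
  else acc

def partition_to_noteduree (partition : String) : List Int × List Int :=
  let l := PySem.Chars.splitOn partition.toList " ".toList   -- partition.split(' '), sep ≠ ''
  -- first loop: build the parallel n/d lists, per token an inner char loop
  let nd := l.foldl (fun (acc : List (List Char) × List (List Char)) x =>
      let p := x.foldl (fun (p : List Char × List Char) y =>
          if pvIsUp y then (p.1 ++ [y], p.2) else (p.1, p.2 ++ [y])) ([], [])
      (acc.1 ++ [p.1], acc.2 ++ [p.2])) ([], [])
  let n := nd.1
  let d := nd.2
  -- second loop: for i in range(len(n))
  (PySem.List.pyRange 0 (PySem.List.len n) 1).foldl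
    (fun acc i => pvStepA acc (PySem.List.pyGetD n i []) (PySem.List.pyGetD d i [])) ([], [])

-- ===== PORT B =====
-- B's emit(): flush the accumulated note/duree of the current token into the outputs
def pvEmit (acc : List Int × List Int) (note duree : List Char) : List Int × List Int :=
  if duree = ['p'] ∧ acc.2 ≠ [] then
    (acc.1, acc.2.dropLast ++ [acc.2.getLast! + PySem.Int.floordiv acc.2.getLast! 2])
  else if pvDicoN.contains note ∧ pvDicoD.contains duree then
    (acc.1 ++ [pvDicoN.getD note 0], acc.2 ++ [pvDicoD.getD duree 0])
  else acc

-- B's per-character step; state = (output lists, (current note, current duree))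
def pvStepC (st : (List Int × List Int) × (List Char × List Char)) (ch : Char) :
    (List Int × List Int) × (List Char × List Char) :=
  if ch = ' ' then (pvEmit st.1 st.2.1 st.2.2, ([], []))
  else if pvIsUp ch then (st.1, (st.2.1 ++ [ch], st.2.2))
  else (st.1, (st.2.1, st.2.2 ++ [ch]))

def partition_to_noteduree_alt (partition : String) : List Int × List Int :=
  let st := partition.toList.foldl pvStepC (([], []), ([], []))
  pvEmit st.1 st.2.1 st.2.2

-- ===== PRECONDITION & SPEC =====
def Spec_partition_to_noteduree (partition : String) (out : List Int × List Int) : Prop := out = partition_to_noteduree_alt partition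
instance (partition : String) (out : List Int × List Int) : Decidable (Spec_partition_to_noteduree partition out) := by unfold Spec_partition_to_noteduree; infer_instance

-- ===== CLAIM =====
def Claim_equal_partition_to_noteduree : Prop := ∀ (partition : String), Dom_partition_to_noteduree partition → Spec_partition_to_noteduree partition (partition_to_noteduree partition)

-- ===== LEMMAS AND PROOFS =====

-- reference splitter for a single-space separator
def pvSplit : List Char → List (List Char)
  | [] => [[]]
  | c :: t => if c = ' ' then [] :: pvSplit t else (pvSplit t).modifyHead (c :: ·)

theorem pvSplit_ne_nil (cs : List Char) : pvSplit cs ≠ [] := by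
  cases cs with
  | nil => simp [pvSplit]
  | cons c t =>
    simp only [pvSplit]
    split
    · simp
    · cases h : pvSplit t with
      | nil => exact absurd h (pvSplit_ne_nil t)
      | cons x xs => simp

theorem pvSplitOn_go (fuel : Nat) (l cur : List Char) (acc : List (List Char))
    (hf : l.length ≤ fuel) :
    PySem.Chars.splitOn.go [' '] fuel l cur acc
      = acc.reverse ++ (pvSplit l).modifyHead (cur.reverse ++ ·) := by
  induction fuel generalizing l cur acc with
  | zero =>
    have : l = [] := by cases l with | nil => rfl | cons a t => simp at hf
    subst this
    simp [PySem.Chars.splitOn.go, pvSplit]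
  | succ fuel ih =>
    cases l with
    | nil => simp [PySem.Chars.splitOn.go, pvSplit]
    | cons c rest =>
      by_cases hc : c = ' '
      · subst hc
        have hpre : [' '].isPrefixOf (' ' :: rest) = true := by simp [List.isPrefixOf]
        simp only [PySem.Chars.splitOn.go, hpre, if_pos, List.length_cons, List.length_nil,
          List.drop_succ_cons, List.drop_zero, Nat.zero_add] at *
        rw [ih rest [] (cur.reverse :: acc) (by omega)]
        cases h2 : pvSplit rest <;> simp [pvSplit, h2]
      · have hpre : [' '].isPrefixOf (c :: rest) = false := by
          simp [List.isPrefixOf]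
          exact fun h => hc h.symm
        simp only [PySem.Chars.splitOn.go, hpre, Bool.false_eq_true, if_false]
        rw [ih rest (c :: cur) acc (by simpa using Nat.lt_succ_iff.mp (by simpa using hf))]
        cases h : pvSplit rest with
        | nil => exact absurd h (pvSplit_ne_nil rest)
        | cons t ts => simp [pvSplit, hc, h]

theorem pvSplitOn_eq (cs : List Char) :
    PySem.Chars.splitOn cs [' '] = pvSplit cs := by
  unfold PySem.Chars.splitOn
  rw [pvSplitOn_go cs.length.succ cs [] [] (by omega)]
  cases h : pvSplit cs with
  | nil => exact absurd h (pvSplit_ne_nil cs)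
  | cons t ts => simp

-- A's inner char loop = a pair of filters
theorem pvCharLoop (cs : List Char) (a b : List Char) :
    cs.foldl (fun (p : List Char × List Char) y =>
        if pvIsUp y then (p.1 ++ [y], p.2) else (p.1, p.2 ++ [y])) (a, b)
      = (a ++ cs.filter pvIsUp, b ++ cs.filter (fun c => !pvIsUp c)) := by
  induction cs generalizing a b with
  | nil => simp
  | cons c cs ih =>
    by_cases h : pvIsUp c = true <;> simp [h, ih]

-- A's first loop = a pair of maps
theorem pvFirstLoop (l : List (List Char)) (a b : List (List Char)) :
    l.foldl (fun (acc : List (List Char) × List (List Char)) x =>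
        (acc.1 ++ [x.filter pvIsUp], acc.2 ++ [x.filter (fun c => !pvIsUp c)])) (a, b)
      = (a ++ l.map (fun x => x.filter pvIsUp), b ++ l.map (fun x => x.filter (fun c => !pvIsUp c))) := by
  induction l generalizing a b with
  | nil => simp
  | cons x l ih => simp [ih]

-- B's streaming fold, flushed at the end, equals A's per-token fold over pvSplit,
-- with the pending note/duree merged into the first token
theorem pvStream (cs : List Char) (acc : List Int × List Int) (a b : List Char) :
    pvEmit (cs.foldl pvStepC (acc, (a, b))).1 (cs.foldl pvStepC (acc, (a, b))).2.1
        (cs.foldl pvStepC (acc, (a, b))).2.2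
      = (match pvSplit cs with
         | [] => acc
         | t :: ts => ts.foldl (fun ac tok => pvStepA ac (tok.filter pvIsUp) (tok.filter (fun c => !pvIsUp c)))
             (pvStepA acc (a ++ t.filter pvIsUp) (b ++ t.filter (fun c => !pvIsUp c)))) := by
  induction cs generalizing acc a b with
  | nil => simp [pvSplit, pvEmit, pvStepA]
  | cons c cs ih =>
    by_cases hc : c = ' '
    · subst hc
      simp only [List.foldl_cons, pvStepC]
      rw [ih]
      cases h : pvSplit cs with
      | nil => exact absurd h (pvSplit_ne_nil cs)
      | cons t ts =>
        simp [pvSplit, h, pvEmit, pvStepA]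
    · by_cases hu : pvIsUp c = true
      · simp only [List.foldl_cons, pvStepC, if_neg hc, hu, if_pos]
        rw [ih]
        cases h : pvSplit cs with
        | nil => exact absurd h (pvSplit_ne_nil cs)
        | cons t ts => simp [pvSplit, hc, h, hu]
      · simp only [List.foldl_cons, pvStepC, if_neg hc, hu, Bool.false_eq_true, if_false]
        rw [ih]
        cases h : pvSplit cs with
        | nil => exact absurd h (pvSplit_ne_nil cs)
        | cons t ts => simp [pvSplit, hc, h, hu]

-- ===== VERDICT =====
theorem partition_to_noteduree_spec : Claim_equal_partition_to_noteduree := by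
  intro partition _
  unfold Spec_partition_to_noteduree partition_to_noteduree partition_to_noteduree_alt
  have hsep : (" ".toList : List Char) = [' '] := rfl
  rw [hsep, pvSplitOn_eq]
  set l := pvSplit partition.toList with hl
  have h1 : l.foldl (fun (acc : List (List Char) × List (List Char)) x =>
      let p := x.foldl (fun (p : List Char × List Char) y =>
          if pvIsUp y then (p.1 ++ [y], p.2) else (p.1, p.2 ++ [y])) ([], [])
      (acc.1 ++ [p.1], acc.2 ++ [p.2])) ([], [])
      = (l.map (fun x => x.filter pvIsUp), l.map (fun x => x.filter (fun c => !pvIsUp c))) := by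
    simp only [pvCharLoop, List.nil_append]
    simpa using pvFirstLoop l [] []
  simp only [h1]
  have hlen : PySem.List.len (l.map (fun x => x.filter pvIsUp)) = PySem.List.len l := by
    simp [PySem.List.len]
  rw [hlen]
  have hg : (fun (acc : List Int × List Int) (i : Int) => pvStepA acc
        (PySem.List.pyGetD (l.map (fun x => x.filter pvIsUp)) i [])
        (PySem.List.pyGetD (l.map (fun x => x.filter (fun c => !pvIsUp c))) i []))
      = (fun acc i => pvStepA acc
            ((PySem.List.pyGetD l i []).filter pvIsUp)
            ((PySem.List.pyGetD l i []).filter (fun c => !pvIsUp c))) := by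
    funext acc i
    have e1 : PySem.List.pyGetD (l.map (fun x => x.filter pvIsUp)) i []
        = (PySem.List.pyGetD l i []).filter pvIsUp := by
      simpa using PySem.List.pyGetD_map (f := fun x => x.filter pvIsUp) (xs := l) (i := i) (d := [])
    have e2 : PySem.List.pyGetD (l.map (fun x => x.filter (fun c => !pvIsUp c))) i []
        = (PySem.List.pyGetD l i []).filter (fun c => !pvIsUp c) := by
      simpa using PySem.List.pyGetD_map (f := fun x => x.filter (fun c => !pvIsUp c)) (xs := l) (i := i) (d := [])
    rw [e1, e2]
  rw [hg]
  rw [PySem.List.foldl_pyRange_zero_pyGetD l []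
      (fun acc tok => pvStepA acc (tok.filter pvIsUp) (tok.filter (fun c => !pvIsUp c))) ([], [])]
  rw [pvStream partition.toList ([], []) [] []]
  cases h : pvSplit partition.toList with
  | nil => exact absurd h (pvSplit_ne_nil partition.toList)
  | cons t ts =>
    have hlts : l = t :: ts := hl.trans h
    rw [hlts, List.foldl_cons]
    simp
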